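-- pv_equiv track=rewrite | github.com/shkim9604/programmers_coding_test | level1/햄버거 만들기.py | solution
-- ===== SOURCE A (Python) =====
-- def solution(ingredient):
--     answer = 0
--     buger = []
--     for i in ingredient:
--         buger.append(i)
--         if buger[-4:] == [1,2,3,1]:
--             answer += 1
--             for i in range(4):
--                 buger.pop()
--     return answer
-- ===== SOURCE B (Python) =====
-- def solution(ingredient):
--     answer = 0
--     lvls = []  # match-levels: progress into the pattern [1,2,3,1]
--     for x in ingredient:
--         t = lvls[-1] if lvls else 0
--         if x == 1 and t == 3:          # pattern completed
--             answer += 1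
--             del lvls[-3:]              # resume from the element beneath
--         elif x == 2 and t == 1:
--             lvls.append(2)
--         elif x == 3 and t == 2:
--             lvls.append(3)
--         elif x == 1:
--             lvls.append(1)
--         else:
--             lvls.append(0)
--     return answer
-- ===== Notes on version B (the rewrite author's own statement) =====
-- stated objective: alternative
-- what changed: Instead of keeping the raw ingredient values on a stack and comparing the last-4 slice with the burger pattern after every push, B keeps a stack of match-levels (progress into the pattern 1-2-3-1); a burger is detected when the top level is 3 and a 1 arrives, popping the three partial levels.
import Mathlib
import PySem

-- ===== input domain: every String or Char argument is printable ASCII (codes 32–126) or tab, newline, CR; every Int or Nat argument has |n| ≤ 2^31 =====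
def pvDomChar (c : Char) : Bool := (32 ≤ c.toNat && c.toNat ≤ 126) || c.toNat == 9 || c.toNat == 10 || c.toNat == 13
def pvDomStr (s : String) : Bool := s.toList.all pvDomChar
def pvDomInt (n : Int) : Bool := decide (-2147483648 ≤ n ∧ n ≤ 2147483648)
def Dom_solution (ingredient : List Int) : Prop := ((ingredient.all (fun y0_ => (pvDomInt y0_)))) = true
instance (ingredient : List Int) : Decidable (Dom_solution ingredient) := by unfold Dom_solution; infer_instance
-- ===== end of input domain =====

-- B replaces A's slice-compare-and-pop over raw ingredient values by a stack of match-levels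
-- into the pattern [1,2,3,1] (objective: alternative decomposition, same O(n) cost).

-- ===== PORT A =====
-- loop body of A: append, compare buger[-4:] with [1,2,3,1], on match pop 4 times.
-- list.pop() removes the last element; ported as dropLast, exact because on the matching
-- branch buger has at least 4 elements (its last-4 slice equals a 4-element list).
def solutionStep (st : Int × List Int) (i : Int) : Int × List Int :=
  let buger := st.2 ++ [i]
  if PySem.List.slice buger (some (-4)) none = [1, 2, 3, 1] then
    (st.1 + 1, (PySem.List.pyRange 0 4 1).foldl (fun b _ => b.dropLast) buger)
  else
    (st.1, buger)

def solution (ingredient : List Int) : Int :=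
  (ingredient.foldl solutionStep (0, [])).1

-- ===== PORT B =====
-- loop body of B: read the top match-level, on completion count and delete lvls[-3:],
-- otherwise push the new match-level.
def solutionAltStep (st : Int × List Int) (x : Int) : Int × List Int :=
  let t := st.2.getLast?.getD 0
  if x = 1 ∧ t = 3 then
    (st.1 + 1, PySem.List.slice st.2 none (some (-3)))
  else if x = 2 ∧ t = 1 then
    (st.1, st.2 ++ [2])
  else if x = 3 ∧ t = 2 then
    (st.1, st.2 ++ [3])
  else if x = 1 then
    (st.1, st.2 ++ [1])
  else
    (st.1, st.2 ++ [0])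

def solution_alt (ingredient : List Int) : Int :=
  (ingredient.foldl solutionAltStep (0, [])).1

-- ===== PRECONDITION & SPEC =====
def Spec_solution (ingredient : List Int) (out : Int) : Prop := out = solution_alt ingredient
instance (ingredient : List Int) (out : Int) : Decidable (Spec_solution ingredient out) := by unfold Spec_solution; infer_instance

-- ===== CLAIM (what is proved, stated in full; the proofs are below) =====
def Claim_equal_solution : Prop := ∀ (ingredient : List Int), Dom_solution ingredient → Spec_solution ingredient (solution ingredient)

-- ===== LEMMAS AND PROOFS =====

-- the level pushed by B when no burger is completed
def stepLvl (t x : Int) : Int :=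
  if x = 2 ∧ t = 1 then 2 else if x = 3 ∧ t = 2 then 3 else if x = 1 then 1 else 0

-- invariant relating A's value stack and B's level stack, both REVERSED (head = top):
-- each level is stepLvl of the level beneath and the value at that position, and no
-- position completed a burger (B pops those, so they never sit on the stack).
inductive LvlRel : List Int → List Int → Prop
  | nil : LvlRel [] []
  | cons {rb rl : List Int} (b l : Int)
      (hnb : ¬(b = 1 ∧ rl.headD 0 = 3))
      (hl : l = stepLvl (rl.headD 0) b)
      (h : LvlRel rb rl) : LvlRel (b :: rb) (l :: rl)

lemma stepLvl_eq_three (u b : Int) : stepLvl u b = 3 ↔ b = 3 ∧ u = 2 := by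
  unfold stepLvl; split_ifs <;> simp_all

lemma stepLvl_eq_two (u b : Int) : stepLvl u b = 2 ↔ b = 2 ∧ u = 1 := by
  unfold stepLvl; split_ifs <;> simp_all

lemma stepLvl_one (u : Int) : stepLvl u 1 = 1 := by
  unfold stepLvl; norm_num

lemma stepLvl_eq_one (u b : Int) : stepLvl u b = 1 ↔ b = 1 := by
  unfold stepLvl; split_ifs <;> simp_all

-- top level 3 forces the (reversed) value stack to start with 3, 2, 1
lemma lvl_top_three {rb rl : List Int} (h : LvlRel rb rl) (htop : rl.headD 0 = 3) :
    ∃ rb₃ rl₃, rb = 3 :: 2 :: 1 :: rb₃ ∧ rl = 3 :: 2 :: 1 :: rl₃ ∧ LvlRel rb₃ rl₃ := by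
  cases h with
  | nil => simp at htop
  | cons b l hnb hl h1 =>
    simp only [List.headD_cons] at htop
    subst htop
    obtain ⟨hb, hu⟩ := (stepLvl_eq_three _ _).mp hl.symm
    subst hb
    cases h1 with
    | nil => simp at hu
    | cons b2 l2 hnb2 hl2 h2 =>
      simp only [List.headD_cons] at hu
      subst hu
      obtain ⟨hb2, hu2⟩ := (stepLvl_eq_two _ _).mp hl2.symm
      subst hb2
      cases h2 with
      | nil => simp at hu2
      | cons b3 l3 hnb3 hl3 h3 =>
        simp only [List.headD_cons] at hu2
        subst hu2
        have hb3 : b3 = 1 := (stepLvl_eq_one _ _).mp hl3.symm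
        subst hb3
        exact ⟨_, _, rfl, rfl, h3⟩

-- conversely: a (reversed) value stack starting with 3, 2, 1 forces top levels 3, 2, 1
lemma lvl_of_values {rb₃ rl : List Int} (h : LvlRel (3 :: 2 :: 1 :: rb₃) rl) :
    ∃ rl₃, rl = 3 :: 2 :: 1 :: rl₃ ∧ LvlRel rb₃ rl₃ := by
  cases h with
  | cons b l hnb hl h1 =>
    cases h1 with
    | cons b2 l2 hnb2 hl2 h2 =>
      cases h2 with
      | cons b3 l3 hnb3 hl3 h3 =>
        rw [stepLvl_one] at hl3
        subst hl3
        have hl2' : l2 = 2 := by rw [hl2]; norm_num [stepLvl]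
        subst hl2'
        have hl1' : l = 3 := by rw [hl]; norm_num [stepLvl]
        subst hl1'
        exact ⟨_, rfl, h3⟩

-- A's pop-4 loop is four dropLasts
lemma popLoop (buger : List Int) :
    (PySem.List.pyRange 0 4 1).foldl (fun (b : List Int) _ => b.dropLast) buger
      = buger.dropLast.dropLast.dropLast.dropLast := by
  have h : PySem.List.pyRange 0 4 1 = [0, 1, 2, 3] := by decide
  rw [h]; rfl

-- A's slice test, read off the reversed stack
lemma sliceTest (buger : List Int) (x : Int) :
    (PySem.List.slice (buger ++ [x]) (some (-4)) none = [1, 2, 3, 1])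
      ↔ (x = 1 ∧ buger.reverse.take 3 = [3, 2, 1]) := by
  rw [PySem.List.slice_from_neg_ofNat (buger ++ [x]) 4 (by omega)]
  constructor
  · intro h
    have h2 : ((buger ++ [x]).drop ((buger ++ [x]).length - 4)).reverse = [1, 3, 2, 1] := by
      rw [h]; rfl
    rw [← List.take_reverse] at h2
    rw [List.reverse_append] at h2
    simp only [List.reverse_cons, List.reverse_nil, List.nil_append, List.singleton_append,
      List.take_succ_cons] at h2
    have hx : x = 1 := by injection h2
    refine ⟨hx, ?_⟩
    have := List.tail_eq_of_cons_eq h2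
    simpa using this
  · rintro ⟨hx, ht⟩
    subst hx
    have h2 : (buger ++ [1]).reverse.take 4 = [1, 3, 2, 1] := by
      rw [List.reverse_append]
      simp only [List.reverse_cons, List.reverse_nil, List.nil_append, List.singleton_append,
        List.take_succ_cons, ht]
    rw [List.take_reverse] at h2
    have := congrArg List.reverse h2
    simpa using this

-- one synchronized step preserves the answer and the invariant
lemma step_sim (ans : Int) (buger lvls : List Int) (x : Int)
    (h : LvlRel buger.reverse lvls.reverse) :
    (solutionStep (ans, buger) x).1 = (solutionAltStep (ans, lvls) x).1 ∧
    LvlRel (solutionStep (ans, buger) x).2.reverse (solutionAltStep (ans, lvls) x).2.reverse := by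
  have htop : lvls.getLast?.getD 0 = lvls.reverse.headD 0 := by
    rw [List.getLast?_eq_head?_reverse]
    cases lvls.reverse <;> rfl
  by_cases hB : x = 1 ∧ lvls.getLast?.getD 0 = 3
  · -- matched: A sees [1,2,3,1] as the last 4, B sees top level 3 with x = 1
    obtain ⟨hx, ht⟩ := hB
    subst hx
    have ht' : lvls.reverse.headD 0 = 3 := htop ▸ ht
    obtain ⟨rb₃, rl₃, hrb, hrl, h₃⟩ := lvl_top_three h ht'
    have hA : PySem.List.slice (buger ++ [1]) (some (-4)) none = [1, 2, 3, 1] := by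
      rw [sliceTest]
      exact ⟨rfl, by rw [hrb]; rfl⟩
    have hlen : 3 ≤ lvls.length := by
      have := congrArg List.length hrl
      simp at this; omega
    have hAstep : solutionStep (ans, buger) 1
        = (ans + 1, (buger ++ [1]).dropLast.dropLast.dropLast.dropLast) := by
      simp only [solutionStep]
      rw [if_pos hA, popLoop]
    have hBstep : solutionAltStep (ans, lvls) 1
        = (ans + 1, PySem.List.slice lvls none (some (-3))) := by
      simp [solutionAltStep, ht]
    rw [hAstep, hBstep]
    refine ⟨rfl, ?_⟩
    have hrevA : ((buger ++ [1]).dropLast.dropLast.dropLast.dropLast).reverse = rb₃ := by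
      rw [← List.tail_reverse, ← List.tail_reverse, ← List.tail_reverse, ← List.tail_reverse]
      rw [List.reverse_append, hrb]
      rfl
    have hlen3 : lvls.length - (lvls.length - 3) = 3 := by omega
    have htk : lvls.take (lvls.length - 3) = (lvls.reverse.drop 3).reverse := by
      have h2 := List.take_reverse (xs := lvls.reverse) (i := lvls.length - 3)
      simpa [hlen3] using h2
    have hrevB : (PySem.List.slice lvls none (some (-3))).reverse = rl₃ := by
      rw [PySem.List.slice_to_neg_ofNat lvls 3 (by omega), htk, List.reverse_reverse, hrl]
      rfl
    rw [hrevA, hrevB]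
    exact h₃
  · -- unmatched: A appends the value, B pushes the new match-level
    have hA : ¬ PySem.List.slice (buger ++ [x]) (some (-4)) none = [1, 2, 3, 1] := by
      rw [sliceTest]
      rintro ⟨hx, ht⟩
      apply hB
      refine ⟨hx, ?_⟩
      rw [htop]
      have hrb : buger.reverse = 3 :: 2 :: 1 :: buger.reverse.drop 3 := by
        conv_lhs => rw [← List.take_append_drop 3 buger.reverse]
        rw [ht]
        rfl
      obtain ⟨rl₃, hrl, _⟩ := lvl_of_values (hrb ▸ h)
      rw [hrl]
      rfl
    have hAstep : solutionStep (ans, buger) x = (ans, buger ++ [x]) := by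
      simp only [solutionStep]
      rw [if_neg hA]
    have hBstep : solutionAltStep (ans, lvls) x
        = (ans, lvls ++ [stepLvl (lvls.getLast?.getD 0) x]) := by
      simp only [solutionAltStep]
      rw [if_neg hB]
      unfold stepLvl
      split_ifs <;> simp_all
    rw [hAstep, hBstep]
    refine ⟨rfl, ?_⟩
    rw [List.reverse_append, List.reverse_append]
    simp only [List.reverse_cons, List.reverse_nil, List.nil_append, List.singleton_append]
    refine LvlRel.cons _ _ ?_ ?_ h
    · rintro ⟨hx1, ht3⟩
      exact hB ⟨hx1, htop ▸ ht3⟩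
    · rw [htop]

lemma main_sim : ∀ (ing : List Int) (ans : Int) (buger lvls : List Int),
    LvlRel buger.reverse lvls.reverse →
    (ing.foldl solutionStep (ans, buger)).1 = (ing.foldl solutionAltStep (ans, lvls)).1 := by
  intro ing
  induction ing with
  | nil => intro ans buger lvls _; rfl
  | cons x rest ih =>
    intro ans buger lvls h
    obtain ⟨hans, hinv⟩ := step_sim ans buger lvls x h
    simp only [List.foldl_cons]
    have hA : solutionStep (ans, buger) x
        = ((solutionStep (ans, buger) x).1, (solutionStep (ans, buger) x).2) := rfl
    have hB : solutionAltStep (ans, lvls) x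
        = ((solutionAltStep (ans, lvls) x).1, (solutionAltStep (ans, lvls) x).2) := rfl
    rw [hA, hB, hans]
    exact ih _ _ _ hinv

-- ===== VERDICT (by name: the statement is the Claim_ definition above) =====
theorem solution_spec : Claim_equal_solution := by
  intro ingredient _
  unfold Spec_solution solution solution_alt
  exact main_sim ingredient 0 [] [] LvlRel.nil
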